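-- pv_equiv track=rewrite | github.com/aimanullah78/rag-chatbot-api | chatbot_service.py | _generate_conversational_response
-- ===== SOURCE A (Python) =====
-- def _generate_conversational_response(query: str) -> str:
--     query_lower = query.lower()
--     if any(kw in query_lower for kw in ["hai", "halo"]):
--         return "Halo! Ada yang bisa saya bantu terkait dokumen Anda hari ini?"
--     if any(kw in query_lower for kw in ["apa kabar"]):
--         return "Kabar saya baik, terima kasih! Saya siap membantu Anda mencari informasi dari dokumen."
--     if any(kw in query_lower for kw in ["terima kasih", "makasih", "thanks"]):
--         return "Sama-sama! Senang bisa membantu. Jika ada pertanyaan lain, jangan ragu untuk bertanya."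
--     if any(kw in query_lower for kw in ["siapa kamu", "kamu siapa"]):
--         return "Saya adalah asisten AI cerdas yang dirancang untuk membantu Anda mencari, membandingkan, dan menganalisis informasi dari dokumen perusahaan."
--     if any(kw in query_lower for kw in ["apa yang bisa kamu lakukan", "bantuan", "help"]):
--         return ("Saya bisa membantu Anda dengan:\n"
--                 "1. Menjawab pertanyaan berdasarkan dokumen.\n"
--                 "2. Membandingkan dua dokumen atau topik.\n"
--                 "3. Mengingat percakapan kita dalam sesi ini.\n\n"
--                 "Coba tanyakan sesuatu!")
--     if any(kw in query_lower for kw in ["sampai jumpa", "dadah"]):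
--         return "Sampai jumpa! Semoga harimu menyenangkan."
--     return "Maaf, saya tidak yakin maksud Anda. Saya dirancang untuk membantu pertanyaan seputar dokumen. Coba ajukan pertanyaan atau katakan 'bantuan' untuk melihat apa yang bisa saya lakukan."
-- ===== SOURCE B (Python) =====
-- _RESPONSES = [
--     "Halo! Ada yang bisa saya bantu terkait dokumen Anda hari ini?",
--     "Kabar saya baik, terima kasih! Saya siap membantu Anda mencari informasi dari dokumen.",
--     "Sama-sama! Senang bisa membantu. Jika ada pertanyaan lain, jangan ragu untuk bertanya.",
--     "Saya adalah asisten AI cerdas yang dirancang untuk membantu Anda mencari, membandingkan, dan menganalisis informasi dari dokumen perusahaan.",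
--     "Saya bisa membantu Anda dengan:\n"
--     "1. Menjawab pertanyaan berdasarkan dokumen.\n"
--     "2. Membandingkan dua dokumen atau topik.\n"
--     "3. Mengingat percakapan kita dalam sesi ini.\n\n"
--     "Coba tanyakan sesuatu!",
--     "Sampai jumpa! Semoga harimu menyenangkan.",
-- ]
--
-- _DEFAULT = "Maaf, saya tidak yakin maksud Anda. Saya dirancang untuk membantu pertanyaan seputar dokumen. Coba ajukan pertanyaan atau katakan 'bantuan' untuk melihat apa yang bisa saya lakukan."
--
-- # flat map: keyword -> index of its response group
-- _KEYWORD_GROUP = {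
--     "hai": 0, "halo": 0,
--     "apa kabar": 1,
--     "terima kasih": 2, "makasih": 2, "thanks": 2,
--     "siapa kamu": 3, "kamu siapa": 3,
--     "apa yang bisa kamu lakukan": 4, "bantuan": 4, "help": 4,
--     "sampai jumpa": 5, "dadah": 5,
-- }
--
--
-- def _generate_conversational_response(query: str) -> str:
--     # One pass over the flat keyword map, accumulating the smallest matching
--     # group index; the smallest index is exactly the first group A's if-chain
--     # would have fired on.
--     q = query.lower()
--     best = len(_RESPONSES)
--     for kw, i in _KEYWORD_GROUP.items():
--         if i < best and kw in q:
--             best = i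
--     return _RESPONSES[best] if best < len(_RESPONSES) else _DEFAULT
-- ===== Notes on version B (the rewrite author's own statement) =====
-- stated objective: alternative
-- what changed: Replaces the if-chain of per-group any() tests with a flat keyword->group-index map scanned in one pass accumulating the minimum matching group index, then indexing into a response table (min-index selection instead of first-true branching).
import Mathlib
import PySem

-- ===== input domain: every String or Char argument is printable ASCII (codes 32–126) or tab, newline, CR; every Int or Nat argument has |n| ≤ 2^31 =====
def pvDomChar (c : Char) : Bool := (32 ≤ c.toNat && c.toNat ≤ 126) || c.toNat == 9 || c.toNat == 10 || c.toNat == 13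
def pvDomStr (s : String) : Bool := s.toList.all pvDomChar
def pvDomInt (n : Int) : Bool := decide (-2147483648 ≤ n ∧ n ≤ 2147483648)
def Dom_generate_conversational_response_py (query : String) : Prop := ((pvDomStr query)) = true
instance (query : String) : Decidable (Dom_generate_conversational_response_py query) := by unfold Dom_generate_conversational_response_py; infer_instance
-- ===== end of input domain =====

-- B replaces A's first-true if-chain by a one-pass minimum-matching-group-index scan over a
-- flat keyword→group map, then indexes into a response table (alternative decomposition; same behaviour).

-- ===== PORT A =====
def generate_conversational_response_py (query : String) : String :=
  let query_lower := PySem.Str.lower query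
  if ["hai", "halo"].any (fun kw => PySem.Str.isIn kw query_lower) then
    "Halo! Ada yang bisa saya bantu terkait dokumen Anda hari ini?"
  else if ["apa kabar"].any (fun kw => PySem.Str.isIn kw query_lower) then
    "Kabar saya baik, terima kasih! Saya siap membantu Anda mencari informasi dari dokumen."
  else if ["terima kasih", "makasih", "thanks"].any (fun kw => PySem.Str.isIn kw query_lower) then
    "Sama-sama! Senang bisa membantu. Jika ada pertanyaan lain, jangan ragu untuk bertanya."
  else if ["siapa kamu", "kamu siapa"].any (fun kw => PySem.Str.isIn kw query_lower) then
    "Saya adalah asisten AI cerdas yang dirancang untuk membantu Anda mencari, membandingkan, dan menganalisis informasi dari dokumen perusahaan."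
  else if ["apa yang bisa kamu lakukan", "bantuan", "help"].any (fun kw => PySem.Str.isIn kw query_lower) then
    "Saya bisa membantu Anda dengan:\n1. Menjawab pertanyaan berdasarkan dokumen.\n2. Membandingkan dua dokumen atau topik.\n3. Mengingat percakapan kita dalam sesi ini.\n\nCoba tanyakan sesuatu!"
  else if ["sampai jumpa", "dadah"].any (fun kw => PySem.Str.isIn kw query_lower) then
    "Sampai jumpa! Semoga harimu menyenangkan."
  else
    "Maaf, saya tidak yakin maksud Anda. Saya dirancang untuk membantu pertanyaan seputar dokumen. Coba ajukan pertanyaan atau katakan 'bantuan' untuk melihat apa yang bisa saya lakukan."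

-- ===== PORT B =====
def pvResponses : List String :=
  [ "Halo! Ada yang bisa saya bantu terkait dokumen Anda hari ini?",
    "Kabar saya baik, terima kasih! Saya siap membantu Anda mencari informasi dari dokumen.",
    "Sama-sama! Senang bisa membantu. Jika ada pertanyaan lain, jangan ragu untuk bertanya.",
    "Saya adalah asisten AI cerdas yang dirancang untuk membantu Anda mencari, membandingkan, dan menganalisis informasi dari dokumen perusahaan.",
    "Saya bisa membantu Anda dengan:\n1. Menjawab pertanyaan berdasarkan dokumen.\n2. Membandingkan dua dokumen atau topik.\n3. Mengingat percakapan kita dalam sesi ini.\n\nCoba tanyakan sesuatu!",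
    "Sampai jumpa! Semoga harimu menyenangkan." ]

def pvDefault : String :=
  "Maaf, saya tidak yakin maksud Anda. Saya dirancang untuk membantu pertanyaan seputar dokumen. Coba ajukan pertanyaan atau katakan 'bantuan' untuk melihat apa yang bisa saya lakukan."

-- the flat keyword→group-index dict of Source B, in insertion order
def pvKeywordGroup : List (String × Nat) :=
  [ ("hai", 0), ("halo", 0),
    ("apa kabar", 1),
    ("terima kasih", 2), ("makasih", 2), ("thanks", 2),
    ("siapa kamu", 3), ("kamu siapa", 3),
    ("apa yang bisa kamu lakukan", 4), ("bantuan", 4), ("help", 4),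
    ("sampai jumpa", 5), ("dadah", 5) ]

def generate_conversational_response_py_alt (query : String) : String :=
  let q := PySem.Str.lower query
  let best := pvKeywordGroup.foldl
    (fun best kwi => if decide (kwi.2 < best) && PySem.Str.isIn kwi.1 q then kwi.2 else best)
    pvResponses.length
  if best < pvResponses.length then pvResponses.getD best pvDefault else pvDefault

-- ===== PRECONDITION & SPEC =====
def Spec_generate_conversational_response_py (query : String) (out : String) : Prop := out = generate_conversational_response_py_alt query
instance (query : String) (out : String) : Decidable (Spec_generate_conversational_response_py query out) := by unfold Spec_generate_conversational_response_py; infer_instance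

-- ===== CLAIM (what is proved, stated in full; the proofs are below) =====
def Claim_equal_generate_conversational_response_py : Prop := ∀ (query : String), Dom_generate_conversational_response_py query → Spec_generate_conversational_response_py query (generate_conversational_response_py query)

-- ===== LEMMAS AND PROOFS =====

-- ===== VERDICT (by name: the statement is the Claim_ definition above) =====
theorem generate_conversational_response_py_spec : Claim_equal_generate_conversational_response_py := by
  intro query _
  unfold Spec_generate_conversational_response_py
  by_cases h1 : PySem.Chars.isIn ['h', 'a', 'i'] (PySem.Chars.lower query.toList) = true
  · simp [generate_conversational_response_py, generate_conversational_response_py_alt, pvKeywordGroup, pvResponses, pvDefault, h1]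
  by_cases h2 : PySem.Chars.isIn ['h', 'a', 'l', 'o'] (PySem.Chars.lower query.toList) = true
  · simp [generate_conversational_response_py, generate_conversational_response_py_alt, pvKeywordGroup, pvResponses, pvDefault, h1, h2]
  by_cases h3 : PySem.Chars.isIn ['a', 'p', 'a', ' ', 'k', 'a', 'b', 'a', 'r'] (PySem.Chars.lower query.toList) = true
  · simp [generate_conversational_response_py, generate_conversational_response_py_alt, pvKeywordGroup, pvResponses, pvDefault, h1, h2, h3]
  by_cases h4 : PySem.Chars.isIn ['t', 'e', 'r', 'i', 'm', 'a', ' ', 'k', 'a', 's', 'i', 'h'] (PySem.Chars.lower query.toList) = true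
  · simp [generate_conversational_response_py, generate_conversational_response_py_alt, pvKeywordGroup, pvResponses, pvDefault, h1, h2, h3, h4]
  by_cases h5 : PySem.Chars.isIn ['m', 'a', 'k', 'a', 's', 'i', 'h'] (PySem.Chars.lower query.toList) = true
  · simp [generate_conversational_response_py, generate_conversational_response_py_alt, pvKeywordGroup, pvResponses, pvDefault, h1, h2, h3, h4, h5]
  by_cases h6 : PySem.Chars.isIn ['t', 'h', 'a', 'n', 'k', 's'] (PySem.Chars.lower query.toList) = true
  · simp [generate_conversational_response_py, generate_conversational_response_py_alt, pvKeywordGroup, pvResponses, pvDefault, h1, h2, h3, h4, h5, h6]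
  by_cases h7 : PySem.Chars.isIn ['s', 'i', 'a', 'p', 'a', ' ', 'k', 'a', 'm', 'u'] (PySem.Chars.lower query.toList) = true
  · simp [generate_conversational_response_py, generate_conversational_response_py_alt, pvKeywordGroup, pvResponses, pvDefault, h1, h2, h3, h4, h5, h6, h7]
  by_cases h8 : PySem.Chars.isIn ['k', 'a', 'm', 'u', ' ', 's', 'i', 'a', 'p', 'a'] (PySem.Chars.lower query.toList) = true
  · simp [generate_conversational_response_py, generate_conversational_response_py_alt, pvKeywordGroup, pvResponses, pvDefault, h1, h2, h3, h4, h5, h6, h7, h8]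
  by_cases h9 : PySem.Chars.isIn ['a', 'p', 'a', ' ', 'y', 'a', 'n', 'g', ' ', 'b', 'i', 's', 'a', ' ', 'k', 'a', 'm', 'u', ' ', 'l', 'a', 'k', 'u', 'k', 'a', 'n'] (PySem.Chars.lower query.toList) = true
  · simp [generate_conversational_response_py, generate_conversational_response_py_alt, pvKeywordGroup, pvResponses, pvDefault, h1, h2, h3, h4, h5, h6, h7, h8, h9]
  by_cases h10 : PySem.Chars.isIn ['b', 'a', 'n', 't', 'u', 'a', 'n'] (PySem.Chars.lower query.toList) = true
  · simp [generate_conversational_response_py, generate_conversational_response_py_alt, pvKeywordGroup, pvResponses, pvDefault, h1, h2, h3, h4, h5, h6, h7, h8, h9, h10]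
  by_cases h11 : PySem.Chars.isIn ['h', 'e', 'l', 'p'] (PySem.Chars.lower query.toList) = true
  · simp [generate_conversational_response_py, generate_conversational_response_py_alt, pvKeywordGroup, pvResponses, pvDefault, h1, h2, h3, h4, h5, h6, h7, h8, h9, h10, h11]
  by_cases h12 : PySem.Chars.isIn ['s', 'a', 'm', 'p', 'a', 'i', ' ', 'j', 'u', 'm', 'p', 'a'] (PySem.Chars.lower query.toList) = true
  · simp [generate_conversational_response_py, generate_conversational_response_py_alt, pvKeywordGroup, pvResponses, pvDefault, h1, h2, h3, h4, h5, h6, h7, h8, h9, h10, h11, h12]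
  by_cases h13 : PySem.Chars.isIn ['d', 'a', 'd', 'a', 'h'] (PySem.Chars.lower query.toList) = true
  · simp [generate_conversational_response_py, generate_conversational_response_py_alt, pvKeywordGroup, pvResponses, pvDefault, h1, h2, h3, h4, h5, h6, h7, h8, h9, h10, h11, h12, h13]
  simp [generate_conversational_response_py, generate_conversational_response_py_alt, pvKeywordGroup, pvResponses, pvDefault, h1, h2, h3, h4, h5, h6, h7, h8, h9, h10, h11, h12, h13]
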